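-- pv_equiv track=rewrite | github.com/skibsthebear/Dictationator-Fastest-whisper-Transcriber | src/dictationer/shortcut_recorder.py | _format_shortcut
-- ===== SOURCE A (Python) =====
-- from typing import List, Optional, Set
--
-- def _format_shortcut(keys: Set[str]) -> str:
--     """
--     Format a set of keys into the correct shortcut string.
--
--     Args:
--         keys: Set of normalized key names
--
--     Returns:
--         Formatted shortcut string (e.g., "ctrl+alt+r")
--     """
--     if not keys:
--         return ""
--
--     # Define modifier order for consistent formatting
--     modifier_order = ['ctrl', 'alt', 'shift', 'win']
--
--     modifiers = []
--     regular_keys = []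
--
--     for key in keys:
--         if key in modifier_order:
--             modifiers.append(key)
--         else:
--             regular_keys.append(key)
--
--     # Sort modifiers by the defined order
--     modifiers.sort(key=lambda x: modifier_order.index(x))
--
--     # Combine modifiers and regular keys
--     all_keys = modifiers + sorted(regular_keys)
--
--     return '+'.join(all_keys)
-- ===== SOURCE B (Python) =====
-- from typing import Set
--
--
-- def _format_shortcut(keys: Set[str]) -> str:
--     """Format a set of keys into a shortcut string (e.g. "ctrl+alt+r")."""
--     modifier_order = ['ctrl', 'alt', 'shift', 'win']
--
--     def sort_key(key):
--         if key in modifier_order: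
--             return (modifier_order.index(key), key)
--         return (len(modifier_order), key)
--
--     return '+'.join(sorted(keys, key=sort_key))
-- ===== Notes on version B (the rewrite author's own statement) =====
-- stated objective: simpler
-- what changed: B performs ONE sort of all keys under a composite (rank, key) sort key (modifiers ranked by canonical position, everything else ranked last and ordered lexicographically), instead of A's partition loop, index-keyed sort of the modifiers, separate sort of the regular keys, list concatenation and empty-set guard.
import Mathlib
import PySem

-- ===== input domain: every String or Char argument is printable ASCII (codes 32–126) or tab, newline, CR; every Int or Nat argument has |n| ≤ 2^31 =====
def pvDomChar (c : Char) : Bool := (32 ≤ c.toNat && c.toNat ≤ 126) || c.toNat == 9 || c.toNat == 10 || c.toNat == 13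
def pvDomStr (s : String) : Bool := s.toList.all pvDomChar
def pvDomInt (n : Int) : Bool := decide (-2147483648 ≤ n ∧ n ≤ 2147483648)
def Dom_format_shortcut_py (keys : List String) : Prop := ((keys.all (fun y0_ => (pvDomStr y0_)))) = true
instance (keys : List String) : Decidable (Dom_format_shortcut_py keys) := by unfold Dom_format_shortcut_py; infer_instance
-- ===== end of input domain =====

-- B replaces A's partition-loop + two separate sorts + concatenation by ONE sort of all keys
-- under a composite (rank, key) sort key (objective: simpler).

-- ===== PORT A =====
-- literal transliteration of A: empty guard, partition loop, sort modifiers by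
-- modifier_order.index, append sorted regular keys, '+'.join.
-- modifier_order.index(x) is only called on x ∈ modifier_order, where index? is some; .getD 0 is never taken.
def format_shortcut_py (keys : List String) : String :=
  if keys = [] then "" else
  let modifier_order : List String := ["ctrl", "alt", "shift", "win"]
  let p := keys.foldl
    (fun (acc : List String × List String) key =>
      if modifier_order.contains key then (acc.1 ++ [key], acc.2)
      else (acc.1, acc.2 ++ [key])) ([], [])
  let modifiers := PySem.List.sorted p.1
    (fun x => (PySem.List.index? modifier_order x).getD 0) false
  let all_keys := modifiers ++ PySem.List.sorted p.2 (fun x => x) false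
  PySem.Str.join "+" all_keys

-- ===== PORT B =====
-- B: one sort of all keys under the tuple key (rank, key); rank = canonical index for a
-- modifier, len(modifier_order) for everything else.
def format_shortcut_py_alt (keys : List String) : String :=
  let modifier_order : List String := ["ctrl", "alt", "shift", "win"]
  let sort_key : String → Int := fun key =>
    if modifier_order.contains key then (PySem.List.index? modifier_order key).getD 0
    else PySem.List.len modifier_order
  PySem.Str.join "+" (PySem.List.sorted2 keys sort_key (fun key => key) false)

-- ===== PRECONDITION & SPEC =====
-- The Python parameter is a set; its List model holds DISTINCT elements, so Pre_ only states that
-- shape (it excludes no Python input on which A returns).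
def Pre_format_shortcut_py (keys : List String) : Prop := keys.Nodup
instance (keys : List String) : Decidable (Pre_format_shortcut_py keys) := by
  unfold Pre_format_shortcut_py; infer_instance
def pvWitness_format_shortcut_py : List String := ["ctrl", "r"]

def Spec_format_shortcut_py (keys : List String) (out : String) : Prop := out = format_shortcut_py_alt keys
instance (keys : List String) (out : String) : Decidable (Spec_format_shortcut_py keys out) := by unfold Spec_format_shortcut_py; infer_instance

-- ===== CLAIM (what is proved, stated in full; the proofs are below) =====
def Claim_equal_format_shortcut_py : Prop := ∀ (keys : List String), Dom_format_shortcut_py keys → Pre_format_shortcut_py keys → Spec_format_shortcut_py keys (format_shortcut_py keys)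

-- ===== LEMMAS AND PROOFS =====

-- rank of a key under B's composite sort key (proof-side name for the function B's port builds)
def pvRank (k : String) : Int :=
  if (["ctrl", "alt", "shift", "win"] : List String).contains k
  then (PySem.List.index? ["ctrl", "alt", "shift", "win"] k).getD 0
  else PySem.List.len ["ctrl", "alt", "shift", "win"]

-- B's combined key, as a single lexicographically ordered key
def pvKey (k : String) : Lex (Int × String) := toLex (pvRank k, k)

-- the canonical result both programs produce
def pvTarget (keys : List String) : List String :=
  (["ctrl", "alt", "shift", "win"] : List String).filter (fun m => keys.contains m)
  ++ PySem.List.sorted (keys.filter (fun k => !(["ctrl", "alt", "shift", "win"] : List String).contains k)) (fun x => x) false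

-- sorted2's comparator with keys (pvRank, id) is exactly strict comparison of pvKey
theorem pv_cmp (a b : String) :
    (decide (pvRank a < pvRank b) || (!decide (pvRank b < pvRank a) && decide (a < b)))
    = decide (pvKey a < pvKey b) := by
  by_cases h1 : pvRank a < pvRank b <;> by_cases h2 : pvRank b < pvRank a <;>
    by_cases h3 : a < b <;>
    simp [pvKey, Prod.Lex.lt_iff, h1, h2, h3] <;> omega

-- B's tuple-key sort is the single-key sort by pvKey
theorem pv_sorted2_eq (keys : List String) :
    PySem.List.sorted2 keys pvRank (fun k => k) false
    = PySem.List.sorted keys pvKey false := by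
  rw [PySem.List.sorted_eq_foldl_insertBy]
  show keys.foldl (fun acc x => PySem.List.insertBy
      (fun a b => decide (pvRank a < pvRank b) || (!decide (pvRank b < pvRank a) && decide (a < b))) x acc) []
    = keys.foldl (fun acc x => PySem.List.insertBy (fun a b => decide (pvKey a < pvKey b)) x acc) []
  have h : (fun a b : String => decide (pvRank a < pvRank b) || (!decide (pvRank b < pvRank a) && decide (a < b)))
      = fun a b => decide (pvKey a < pvKey b) := by
    funext a b; exact pv_cmp a b
  rw [h]

-- A's partition loop collects exactly the two filters of keys, in order.
theorem pv_partition (mo : List String) (keys : List String) (acc : List String × List String) :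
    keys.foldl
      (fun (acc : List String × List String) key =>
        if mo.contains key then (acc.1 ++ [key], acc.2)
        else (acc.1, acc.2 ++ [key])) acc
    = (acc.1 ++ keys.filter (fun k => mo.contains k),
       acc.2 ++ keys.filter (fun k => !mo.contains k)) := by
  induction keys generalizing acc with
  | nil => simp
  | cons x t ih =>
    rw [List.foldl_cons, ih]
    by_cases h : x ∈ mo <;> simp [h]

-- sorting the modifiers found in keys by their index in the order list
-- is the same as filtering the order list by membership in keys.
theorem pv_mods (keys : List String) (h : keys.Nodup) :
    PySem.List.sorted (keys.filter (fun k => (["ctrl","alt","shift","win"] : List String).contains k))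
      (fun x => (PySem.List.index? (["ctrl","alt","shift","win"] : List String) x).getD 0) false
    = (["ctrl","alt","shift","win"] : List String).filter (fun m => keys.contains m) := by
  apply PySem.List.sorted_eq_of_perm_of_pairwise_lt
  · rw [List.perm_ext_iff_of_nodup (List.Nodup.filter _ (by decide)) (List.Nodup.filter _ h)]
    intro a; simp [List.mem_filter, and_comm]
  · by_cases h1 : "ctrl" ∈ keys <;> by_cases h2 : "alt" ∈ keys <;>
      by_cases h3 : "shift" ∈ keys <;> by_cases h4 : "win" ∈ keys <;>
      simp [h1, h2, h3, h4] <;> decide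

-- elements of the regular part have rank 4
theorem pv_rank_regular (k : String)
    (h : (["ctrl", "alt", "shift", "win"] : List String).contains k = false) :
    pvRank k = 4 := by
  unfold pvRank; rw [h]; simp [PySem.List.len_eq]

-- the target is a permutation of keys …
theorem pv_target_perm (keys : List String) (h : keys.Nodup) :
    (pvTarget keys).Perm keys := by
  have hmo : (["ctrl", "alt", "shift", "win"] : List String).Nodup := by decide
  have hR := PySem.List.sorted_perm
    (keys.filter (fun k => !(["ctrl", "alt", "shift", "win"] : List String).contains k)) (fun x => x) false
  have hnodC : (pvTarget keys).Nodup := by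
    unfold pvTarget
    refine List.Nodup.append (hmo.filter _) (hR.symm.nodup (h.filter _)) ?_
    intro a haM haR
    have h1 : (["ctrl", "alt", "shift", "win"] : List String).contains a = true := by
      have := (List.mem_filter.mp haM).1; simpa using this
    have h2 := (List.mem_filter.mp ((PySem.List.mem_sorted _ _ _ _).mp haR)).2
    simp at h1 h2
    tauto
  rw [List.perm_ext_iff_of_nodup hnodC h]
  intro a
  simp only [pvTarget, List.mem_append, List.mem_filter, PySem.List.mem_sorted]
  constructor
  · rintro (h1 | h1)
    · simpa using h1.2
    · exact h1.1
  · intro hk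
    by_cases hm : (["ctrl", "alt", "shift", "win"] : List String).contains a = true
    · exact Or.inl ⟨by simpa using hm, by simpa using hk⟩
    · exact Or.inr ⟨hk, by simpa using hm⟩

-- … and strictly increasing under pvKey
theorem pv_target_pairwise (keys : List String) (h : keys.Nodup) :
    (pvTarget keys).Pairwise (fun a b => pvKey a < pvKey b) := by
  unfold pvTarget
  rw [List.pairwise_append]
  refine ⟨?_, ?_, ?_⟩
  · have hmo : (["ctrl", "alt", "shift", "win"] : List String).Pairwise
        (fun a b => pvRank a < pvRank b) := by decide
    exact (hmo.filter _).imp (fun hab => Prod.Lex.lt_iff.mpr (Or.inl hab))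
  · have hle := PySem.List.sorted_pairwise
      (keys.filter (fun k => !(["ctrl", "alt", "shift", "win"] : List String).contains k)) (fun x => x)
    have hnd : (PySem.List.sorted
        (keys.filter (fun k => !(["ctrl", "alt", "shift", "win"] : List String).contains k)) (fun x => x) false).Nodup :=
      (PySem.List.sorted_perm _ _ _).symm.nodup (h.filter _)
    refine List.Pairwise.imp_of_mem ?_ (hle.and hnd)
    intro a b ha hb hab
    have ha4 : pvRank a = 4 := pv_rank_regular a (by
      have := (List.mem_filter.mp ((PySem.List.mem_sorted _ _ _ _).mp ha)).2
      simpa using this)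
    have hb4 : pvRank b = 4 := pv_rank_regular b (by
      have := (List.mem_filter.mp ((PySem.List.mem_sorted _ _ _ _).mp hb)).2
      simpa using this)
    exact Prod.Lex.lt_iff.mpr
      (Or.inr ⟨by simp [pvKey, ha4, hb4], by simpa [pvKey] using lt_of_le_of_ne hab.1 hab.2⟩)
  · intro m hm r hr
    have hmlt : pvRank m < 4 := by
      have hmem : m ∈ (["ctrl", "alt", "shift", "win"] : List String) := (List.mem_filter.mp hm).1
      fin_cases hmem <;> decide
    have hr4 : pvRank r = 4 := pv_rank_regular r (by
      have := (List.mem_filter.mp ((PySem.List.mem_sorted _ _ _ _).mp hr)).2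
      simpa using this)
    exact Prod.Lex.lt_iff.mpr (Or.inl (by simpa [pvKey, hr4] using hmlt))

theorem format_shortcut_py_eq (keys : List String) (h : keys.Nodup) :
    format_shortcut_py keys = format_shortcut_py_alt keys := by
  rcases eq_or_ne keys [] with rfl | hne
  · rfl
  · have hB : format_shortcut_py_alt keys
        = PySem.Str.join "+" (PySem.List.sorted2 keys pvRank (fun k => k) false) := rfl
    rw [hB, pv_sorted2_eq,
      PySem.List.sorted_eq_of_perm_of_pairwise_lt keys (pvTarget keys) pvKey
        (pv_target_perm keys h) (pv_target_pairwise keys h)]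
    simp only [format_shortcut_py, if_neg hne]
    rw [pv_partition, List.nil_append, List.nil_append, pv_mods keys h]
    rfl

-- ===== VERDICT (by name: the statement is the Claim_ definition above) =====
theorem format_shortcut_py_spec : Claim_equal_format_shortcut_py := by
  intro keys _ hpre
  exact format_shortcut_py_eq keys hpre
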